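-- pv_equiv track=rewrite | github.com/advait122/ROADmap | backend/roadmap_engine/services/location_catalog_service.py | _filter_values
-- ===== SOURCE A (Python) =====
-- def _normalize(value: str) -> str:
--     return str(value or "").strip().lower()
--
-- def _filter_values(values: list[str], query: str, limit: int) -> list[str]:
--     max_items = max(1, min(int(limit), 10000))
--     normalized_query = _normalize(query)
--     if not normalized_query:
--         return values[:max_items]
--
--     starts_with: list[str] = []
--     contains: list[str] = []
--     for item in values:
--         normalized_item = _normalize(item)
--         if normalized_item.startswith(normalized_query):
--             starts_with.append(item)
--         elif normalized_query in normalized_item: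
--             contains.append(item)
--
--     return (starts_with + contains)[:max_items]
-- ===== SOURCE B (Python) =====
-- def _normalize(value: str) -> str:
--     return str(value or "").strip().lower()
--
-- def _filter_values(values: list[str], query: str, limit: int) -> list[str]:
--     max_items = max(1, min(int(limit), 10000))
--     q = _normalize(query)
--     if not q:
--         return values[:max_items]
--     tagged = [(0 if n.startswith(q) else 1, v)
--               for v, n in ((v, _normalize(v)) for v in values)
--               if q in n]
--     tagged.sort(key=lambda t: t[0])
--     return [v for _, v in tagged][:max_items]
-- ===== Notes on version B (the rewrite author's own statement) =====
-- stated objective: idiomatic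
-- what changed: Replaces A's two manually-maintained accumulator lists with a single filtered priority-tagged list ordered by one stable sort on the tag and then projected and sliced.
import Mathlib
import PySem

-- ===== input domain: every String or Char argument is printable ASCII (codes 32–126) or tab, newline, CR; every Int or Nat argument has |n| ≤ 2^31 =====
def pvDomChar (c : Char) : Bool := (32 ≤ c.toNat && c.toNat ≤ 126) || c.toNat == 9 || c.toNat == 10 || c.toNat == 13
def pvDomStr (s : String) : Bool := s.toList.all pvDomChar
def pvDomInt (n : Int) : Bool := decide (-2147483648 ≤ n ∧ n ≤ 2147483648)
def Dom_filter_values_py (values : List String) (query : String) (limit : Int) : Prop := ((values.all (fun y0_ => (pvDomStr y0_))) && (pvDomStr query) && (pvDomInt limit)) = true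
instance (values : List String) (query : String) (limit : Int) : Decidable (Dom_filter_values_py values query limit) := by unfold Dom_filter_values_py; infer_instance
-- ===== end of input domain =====

-- B replaces A's two manual accumulator lists by a single filtered, priority-tagged list
-- ordered with one stable sort on the tag (objective: idiomatic; same asymptotic cost).

-- ===== PORT A =====
-- shared helper: Python _normalize (str(value or "").strip().lower(); 'or' is the identity on str)
def pvNormalize (s : String) : String := PySem.Str.lower (PySem.Str.strip s)

def filter_values_py (values : List String) (query : String) (limit : Int) : List String :=
  let max_items : Int := max 1 (min limit 10000)
  let normalized_query := pvNormalize query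
  if normalized_query = "" then PySem.List.slice values none (some max_items)
  else
    let pr := values.foldl
      (fun (acc : List String × List String) item =>
        let normalized_item := pvNormalize item
        if PySem.Str.startswith normalized_item normalized_query then (acc.1 ++ [item], acc.2)
        else if PySem.Str.isIn normalized_query normalized_item then (acc.1, acc.2 ++ [item])
        else acc)
      ([], [])
    PySem.List.slice (pr.1 ++ pr.2) none (some max_items)

-- ===== PORT B =====
def filter_values_py_alt (values : List String) (query : String) (limit : Int) : List String :=
  let max_items : Int := max 1 (min limit 10000)
  let q := pvNormalize query
  if q = "" then PySem.List.slice values none (some max_items)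
  else
    let tagged := (values.map (fun v => (v, pvNormalize v))).filterMap
      (fun p => if PySem.Str.isIn q p.2 then
          some ((if PySem.Str.startswith p.2 q then (0 : Int) else 1), p.1)
        else none)
    PySem.List.slice
      ((PySem.List.sorted tagged (fun t => t.1) false).map (fun t => t.2))
      none (some max_items)

-- ===== PRECONDITION & SPEC =====
def Spec_filter_values_py (values : List String) (query : String) (limit : Int) (out : List String) : Prop := out = filter_values_py_alt values query limit
instance (values : List String) (query : String) (limit : Int) (out : List String) : Decidable (Spec_filter_values_py values query limit out) := by unfold Spec_filter_values_py; infer_instance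

-- ===== CLAIM (what is proved, stated in full; the proofs are below) =====
def Claim_equal_filter_values_py : Prop := ∀ (values : List String) (query : String) (limit : Int), Dom_filter_values_py values query limit → Spec_filter_values_py values query limit (filter_values_py values query limit)

-- ===== LEMMAS AND PROOFS =====

-- A's loop: the two accumulators collect exactly the startswith-filter and the (¬startswith ∧ contains)-filter.
theorem foldA_eq (nq : String) (vs : List String) (a b : List String) :
    vs.foldl
      (fun (acc : List String × List String) item =>
        let ni := pvNormalize item
        if PySem.Str.startswith ni nq then (acc.1 ++ [item], acc.2)
        else if PySem.Str.isIn nq ni then (acc.1, acc.2 ++ [item])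
        else acc)
      (a, b)
    = (a ++ vs.filter (fun v => PySem.Str.startswith (pvNormalize v) nq),
       b ++ vs.filter (fun v => !PySem.Str.startswith (pvNormalize v) nq
                                 && PySem.Str.isIn nq (pvNormalize v))) := by
  induction vs generalizing a b with
  | nil => simp
  | cons x xs ih =>
    simp only [PySem.Str.startswith_eq, PySem.Str.isIn_eq] at ih ⊢
    simp only [List.foldl_cons, List.filter_cons]
    by_cases h1 : PySem.Chars.startswith (pvNormalize x).toList nq.toList = true
    · simp [h1, ih, List.append_assoc]
    · by_cases h2 : PySem.Chars.isIn nq.toList (pvNormalize x).toList = true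
      · simp [h1, h2, ih, List.append_assoc]
      · simp [h1, h2, ih]

-- B's comprehension: keep-and-tag is map-after-filter.
theorem tagged_eq (q : String) (vs : List String) :
    (vs.map (fun v => (v, pvNormalize v))).filterMap
      (fun p => if PySem.Str.isIn q p.2 then
          some ((if PySem.Str.startswith p.2 q then (0 : Int) else 1), p.1)
        else none)
    = (vs.filter (fun v => PySem.Str.isIn q (pvNormalize v))).map
        (fun v => ((if PySem.Str.startswith (pvNormalize v) q then (0 : Int) else 1), v)) := by
  induction vs with
  | nil => rfl
  | cons x xs ih =>
    simp only [PySem.Str.startswith_eq, PySem.Str.isIn_eq] at ih ⊢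
    simp only [List.map_cons, List.filterMap_cons, List.filter_cons]
    by_cases h : PySem.Chars.isIn q.toList (pvNormalize x).toList = true <;> simp [h, ih]

theorem chars_startswith_imp_isIn (q n : List Char) (h : PySem.Chars.startswith n q = true) :
    PySem.Chars.isIn q n = true :=
  (PySem.Chars.isIn_iff_infix _ _).2 ((PySem.Chars.startswith_iff _ _).1 h).isInfix

-- stable insertion of a 0-tagged element goes between the 0-block and the 1-block
theorem insertBy_mid (x : Int × String) (A B : List (Int × String)) (hx : x.1 = 0)
    (hA : ∀ a ∈ A, a.1 = 0) (hB : ∀ b ∈ B, b.1 = 1) :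
    PySem.List.insertBy (fun a b => decide (a.1 < b.1)) x (A ++ B) = A ++ x :: B := by
  induction A with
  | nil =>
    cases B with
    | nil => simp [PySem.List.insertBy]
    | cons y ys =>
      have hy : y.1 = 1 := hB y (by simp)
      have hc : decide (x.1 < y.1) = true := by rw [hx, hy]; decide
      simp only [List.nil_append, PySem.List.insertBy, hc, if_true]
  | cons a as ih =>
    have ha : a.1 = 0 := hA a (by simp)
    have hc : decide (x.1 < a.1) = false := by rw [hx, ha]; decide
    simp only [List.cons_append, PySem.List.insertBy, hc, Bool.false_eq_true, if_false,
      List.cons.injEq, true_and]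
    exact ih (fun a' ha' => hA a' (by simp [ha']))

-- stable insertion of a 1-tagged element goes to the end when all tags are ≤ 1
theorem insertBy_end (x : Int × String) (L : List (Int × String)) (hx : x.1 = 1)
    (hL : ∀ a ∈ L, a.1 = 0 ∨ a.1 = 1) :
    PySem.List.insertBy (fun a b => decide (a.1 < b.1)) x L = L ++ [x] := by
  induction L with
  | nil => simp [PySem.List.insertBy]
  | cons y ys ih =>
    have hc : decide (x.1 < y.1) = false := by
      rcases hL y (by simp) with h | h <;> rw [hx, h] <;> decide
    simp only [PySem.List.insertBy, hc, Bool.false_eq_true, if_false,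
      List.cons_append, List.cons.injEq, true_and]
    exact ih (fun a ha => hL a (by simp [ha]))

-- the insertion-sort fold keeps the shape (0-block ++ 1-block)
theorem fold01 (l : List (Int × String)) (A B : List (Int × String))
    (hl : ∀ x ∈ l, x.1 = 0 ∨ x.1 = 1)
    (hA : ∀ a ∈ A, a.1 = 0) (hB : ∀ b ∈ B, b.1 = 1) :
    l.foldl (fun acc x => PySem.List.insertBy (fun a b => decide (a.1 < b.1)) x acc) (A ++ B)
      = (A ++ l.filter (fun t => t.1 == 0)) ++ (B ++ l.filter (fun t => t.1 == 1)) := by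
  induction l generalizing A B with
  | nil => simp
  | cons x xs ih =>
    simp only [List.foldl_cons, List.filter_cons]
    rcases hl x (List.mem_cons_self ..) with hx | hx
    · rw [insertBy_mid x A B hx hA hB,
        show A ++ x :: B = (A ++ [x]) ++ B by simp,
        ih (A ++ [x]) B (fun y hy => hl y (List.mem_cons_of_mem _ hy))
          (fun a ha => by
            rcases List.mem_append.1 ha with h | h
            · exact hA a h
            · rw [List.mem_singleton.1 h]; exact hx) hB]
      simp [hx, List.append_assoc]
    · rw [insertBy_end x (A ++ B) hx
          (fun a ha => by
            rcases List.mem_append.1 ha with h | h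
            · exact Or.inl (hA a h)
            · exact Or.inr (hB a h)),
        show (A ++ B) ++ [x] = A ++ (B ++ [x]) by simp,
        ih A (B ++ [x]) (fun y hy => hl y (List.mem_cons_of_mem _ hy)) hA
          (fun b hb => by
            rcases List.mem_append.1 hb with h | h
            · exact hB b h
            · rw [List.mem_singleton.1 h]; exact hx)]
      simp [hx, List.append_assoc]

-- stable sort by a {0,1}-valued tag is 0-block ++ 1-block in original order
theorem sorted01 (l : List (Int × String)) (hl : ∀ x ∈ l, x.1 = 0 ∨ x.1 = 1) :
    PySem.List.sorted l (fun t => t.1) false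
      = l.filter (fun t => t.1 == 0) ++ l.filter (fun t => t.1 == 1) := by
  rw [PySem.List.sorted_eq_foldl_insertBy]
  simpa using fold01 l [] [] hl (by simp) (by simp)

-- projecting the 0-tagged block back to strings gives A's starts_with list
theorem group0 (q : String) (xs : List String) :
    ((((xs.filter (fun v => PySem.Str.isIn q (pvNormalize v))).map
        (fun v => ((if PySem.Str.startswith (pvNormalize v) q then (0 : Int) else 1), v))).filter
        (fun t => t.1 == 0)).map (fun t => t.2))
      = xs.filter (fun v => PySem.Str.startswith (pvNormalize v) q) := by
  induction xs with
  | nil => rfl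
  | cons x xs ih =>
    simp only [PySem.Str.startswith_eq, PySem.Str.isIn_eq] at ih ⊢
    simp only [List.filter_cons]
    by_cases h2 : PySem.Chars.isIn q.toList (pvNormalize x).toList = true
    · by_cases h1 : PySem.Chars.startswith (pvNormalize x).toList q.toList = true
      · simp only [h2, if_true, List.map_cons, List.filter_cons]
        simpa [h1, h2] using ih
      · simp only [h2, if_true, List.map_cons, List.filter_cons]
        simpa [h1, h2] using ih
    · have h1 : ¬ PySem.Chars.startswith (pvNormalize x).toList q.toList = true :=
        fun h => h2 (chars_startswith_imp_isIn _ _ h)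
      simpa [h1, h2] using ih

-- projecting the 1-tagged block gives A's contains list
theorem group1 (q : String) (xs : List String) :
    ((((xs.filter (fun v => PySem.Str.isIn q (pvNormalize v))).map
        (fun v => ((if PySem.Str.startswith (pvNormalize v) q then (0 : Int) else 1), v))).filter
        (fun t => t.1 == 1)).map (fun t => t.2))
      = xs.filter (fun v => !PySem.Str.startswith (pvNormalize v) q
                             && PySem.Str.isIn q (pvNormalize v)) := by
  induction xs with
  | nil => rfl
  | cons x xs ih =>
    simp only [PySem.Str.startswith_eq, PySem.Str.isIn_eq] at ih ⊢
    simp only [List.filter_cons]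
    by_cases h2 : PySem.Chars.isIn q.toList (pvNormalize x).toList = true
    · by_cases h1 : PySem.Chars.startswith (pvNormalize x).toList q.toList = true
      · simp only [h2, if_true, List.map_cons, List.filter_cons]
        simpa [h1, h2] using ih
      · simp only [h2, if_true, List.map_cons, List.filter_cons]
        simpa [h1, h2] using ih
    · have h1 : ¬ PySem.Chars.startswith (pvNormalize x).toList q.toList = true :=
        fun h => h2 (chars_startswith_imp_isIn _ _ h)
      simpa [h1, h2] using ih

-- ===== VERDICT (by name: the statement is the Claim_ definition above) =====
theorem filter_values_py_spec : Claim_equal_filter_values_py := by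
  intro values query limit _
  unfold Spec_filter_values_py filter_values_py filter_values_py_alt
  simp only []
  by_cases hq : pvNormalize query = ""
  · simp [hq]
  · simp only [hq, if_false]
    rw [foldA_eq, tagged_eq]
    rw [sorted01 _ (by
      intro x hx
      rcases List.mem_map.1 hx with ⟨v, _, rfl⟩
      split <;> simp)]
    rw [List.map_append, group0, group1]
    simp
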